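-- pv_equiv track=rewrite | github.com/1noro/mrmd | mrmd/RecMailPlain.py | remove_sig_msg_head
-- ===== SOURCE A (Python) =====
-- def remove_sig_msg_head(txt):
--     record = False
--     out = ""
--     txt_lines = txt.split('\n')
--     for line in txt_lines:
--         if record: out += line + '\n'
--         if (not record) and line == "": record = True
--     return out
-- ===== SOURCE B (Python) =====
-- def remove_sig_msg_head(txt):
--     lines = txt.split('\n')
--     try:
--         i = lines.index('')
--     except ValueError:
--         return ""
--     return ''.join(l + '\n' for l in lines[i + 1:])
-- ===== Notes on version B (the rewrite author's own statement) =====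
-- stated objective: simpler
-- what changed: Replaces A's single-pass boolean-flag accumulator loop with a locate-then-join decomposition: find the first empty line's index and join every later line (each suffixed with a newline) in one expression.
import Mathlib
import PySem

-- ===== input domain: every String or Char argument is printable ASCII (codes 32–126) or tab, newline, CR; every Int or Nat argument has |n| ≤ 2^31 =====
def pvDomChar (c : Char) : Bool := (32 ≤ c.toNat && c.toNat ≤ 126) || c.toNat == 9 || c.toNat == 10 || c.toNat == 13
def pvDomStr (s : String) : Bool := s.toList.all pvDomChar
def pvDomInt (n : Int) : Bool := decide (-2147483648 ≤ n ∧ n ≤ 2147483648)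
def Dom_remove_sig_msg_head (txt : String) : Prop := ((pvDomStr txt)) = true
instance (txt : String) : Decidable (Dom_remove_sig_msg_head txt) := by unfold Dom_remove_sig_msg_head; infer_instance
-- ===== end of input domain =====

-- B replaces A's boolean-flag accumulator loop with locate-the-first-empty-line-then-join (simpler decomposition).

-- ===== PORT A =====
-- step of A's for-loop: state = (record, out); out is extended first, then record is set
def pvStepA (st : Bool × String) (line : String) : Bool × String :=
  (if (!st.1) && (line == "") then true else st.1,
   if st.1 then st.2 ++ (line ++ "\n") else st.2)

def remove_sig_msg_head (txt : String) : String :=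
  let txt_lines := (PySem.Str.split? txt "\n").getD []   -- sep "\n" ≠ "", so split? is always some
  (txt_lines.foldl pvStepA (false, "")).2

-- ===== PORT B =====
def remove_sig_msg_head_alt (txt : String) : String :=
  let lines := (PySem.Str.split? txt "\n").getD []   -- sep "\n" ≠ "", so split? is always some
  match PySem.List.index? lines "" with
  | none => ""                                        -- lines.index('') raised ValueError
  | some i => PySem.Str.join "" ((PySem.List.slice lines (some ((i : Int) + 1)) none).map (fun l => l ++ "\n"))

-- ===== PRECONDITION & SPEC =====
def Spec_remove_sig_msg_head (txt : String) (out : String) : Prop := out = remove_sig_msg_head_alt txt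
instance (txt : String) (out : String) : Decidable (Spec_remove_sig_msg_head txt out) := by unfold Spec_remove_sig_msg_head; infer_instance

-- ===== CLAIM (what is proved, stated in full; the proofs are below) =====
def Claim_equal_remove_sig_msg_head : Prop := ∀ (txt : String), Dom_remove_sig_msg_head txt → Spec_remove_sig_msg_head txt (remove_sig_msg_head txt)

-- ===== LEMMAS AND PROOFS =====

lemma pvJoinNil : PySem.Str.join "" ([] : List String) = "" := by
  simp [PySem.Str.join, PySem.Chars.join, List.intercalate]

lemma pvIntercalateNil : ∀ (xss : List (List Char)), List.intercalate ([] : List Char) xss = xss.flatten := by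
  intro xss
  induction xss with
  | nil => simp [List.intercalate]
  | cons x xs ih =>
    cases xs with
    | nil => simp [List.intercalate]
    | cons y ys =>
      simp [List.intercalate, List.intersperse] at ih ⊢
      simpa using ih

lemma pvJoinCons (x : String) (xs : List String) :
    PySem.Str.join "" (x :: xs) = x ++ PySem.Str.join "" xs := by
  apply String.toList_injective
  simp [PySem.Str.join, PySem.Chars.join, pvIntercalateNil]

lemma pvFoldTrue : ∀ (ls : List String) (out : String),
    ls.foldl pvStepA (true, out) =
      (true, out ++ PySem.Str.join "" (ls.map (fun l => l ++ "\n"))) := by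
  intro ls
  induction ls with
  | nil => intro out; simp [pvJoinNil]
  | cons x xs ih =>
    intro out
    simp only [List.foldl, pvStepA, List.map, Bool.not_true, Bool.false_and,
      Bool.false_eq_true, if_false, if_true]
    rw [ih, pvJoinCons, String.append_assoc]

lemma pvFoldFalse : ∀ (ls : List String) (out : String),
    ls.foldl pvStepA (false, out) =
      (match List.idxOf? "" ls with
       | none => (false, out)
       | some i => (true, out ++ PySem.Str.join "" ((ls.drop (i + 1)).map (fun l => l ++ "\n")))) := by
  intro ls
  induction ls with
  | nil => intro out; simp [List.idxOf?]
  | cons x xs ih =>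
    intro out
    by_cases hx : x = ""
    · subst hx
      simp only [List.foldl, pvStepA, Bool.not_false, BEq.rfl, Bool.and_self, if_true,
        Bool.false_eq_true, if_false]
      rw [pvFoldTrue]
      simp [List.idxOf?_cons]
    · have hbe : (x == "") = false := by simpa using hx
      simp only [List.foldl, pvStepA, hbe, Bool.and_false, Bool.not_false,
        Bool.false_eq_true, if_false]
      rw [ih, List.idxOf?_cons]
      simp only [hbe, Bool.false_eq_true, if_false]
      cases h : List.idxOf? "" xs with
      | none => simp
      | some i => simp

-- ===== VERDICT (by name: the statement is the Claim_ definition above) =====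
theorem remove_sig_msg_head_spec : Claim_equal_remove_sig_msg_head := by
  intro txt _
  unfold Spec_remove_sig_msg_head remove_sig_msg_head remove_sig_msg_head_alt
  simp only []
  rw [pvFoldFalse]
  cases h : List.idxOf? "" ((PySem.Str.split? txt "\n").getD []) with
  | none => simp [PySem.List.index?, h]
  | some i =>
    have : PySem.List.index? ((PySem.Str.split? txt "\n").getD []) "" = some i := by
      simpa [PySem.List.index?] using h
    simp only [this]
    have hs : PySem.List.slice ((PySem.Str.split? txt "\n").getD []) (some ((i : Int) + 1)) none
        = List.drop (i + 1) ((PySem.Str.split? txt "\n").getD []) := by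
      have := PySem.List.slice_from ((PySem.Str.split? txt "\n").getD []) (a := (i : Int) + 1) (by positivity)
      simpa using this
    rw [hs]
    simp
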